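-- pv_equiv track=rewrite | github.com/smohapatra1/scripting | python/practice/start_again/2024/05122024/similar_strings.py | extract_map
-- ===== SOURCE A (Python) =====
-- def extract_map(subst):
--     pairs_ = []
--     len_ = len(subst)
--     for s in range(len_-1):
--         s_pairs_ = 0b0
--         index = 0
--         for e in range(s + 1, len_):
--             if subst[s] == subst[e]:
--                 s_pairs_ += 1 << index
--             index += 1
--         pairs_.append(s_pairs_)
--     return pairs_
-- ===== SOURCE B (Python) =====
-- def extract_map(subst):
--     full = {}
--     for i, ch in enumerate(subst):
--         full[ch] = full.get(ch, 0) + (1 << i)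
--     return [full[subst[s]] >> (s + 1) for s in range(len(subst) - 1)]
-- ===== Notes on version B (the rewrite author's own statement) =====
-- stated objective: faster
-- what changed: B precomputes one full occurrence bitmask per distinct character in a single pass, then each result is that mask shifted right by s+1, instead of A's inner scan over all later positions for every index.
import Mathlib
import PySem

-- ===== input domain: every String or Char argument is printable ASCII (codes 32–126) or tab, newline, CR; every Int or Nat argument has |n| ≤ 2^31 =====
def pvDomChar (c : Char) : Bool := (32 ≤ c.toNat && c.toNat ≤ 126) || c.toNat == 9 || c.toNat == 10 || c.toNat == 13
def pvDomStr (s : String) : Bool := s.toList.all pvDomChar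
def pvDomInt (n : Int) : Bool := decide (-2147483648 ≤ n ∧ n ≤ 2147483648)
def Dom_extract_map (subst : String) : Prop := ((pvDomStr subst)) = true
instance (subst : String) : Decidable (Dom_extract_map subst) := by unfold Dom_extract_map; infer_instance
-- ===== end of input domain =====

-- B replaces A's quadratic inner scan by one precomputed per-character occurrence bitmask and a right shift per index (objective: faster).

-- ===== PORT A =====
-- literal transliteration of A: outer loop over s, inner loop over e accumulating bits
def extract_map (subst : String) : List Int :=
  let cs := subst.toList
  let len_ : Int := PySem.List.len cs
  (PySem.List.pyRange 0 (len_ - 1) 1).foldl (fun pairs_ s =>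
    let inner := (PySem.List.pyRange (s + 1) len_ 1).foldl
      (fun (st : Int × Int) e =>
        (if PySem.List.pyGet? cs s == PySem.List.pyGet? cs e
           then st.1 + ((1 : Int) <<< st.2.toNat) else st.1,
         st.2 + 1)) (0, 0)
    pairs_ ++ [inner.1]) []

-- ===== PORT B =====
-- literal transliteration of B: build the per-char full bitmask dict, then shift.
-- full[subst[s]] never raises (subst[s] occurs in subst), so the lookup is ported as getD with default 0.
def extract_map_alt (subst : String) : List Int :=
  let cs := subst.toList
  let full := (PySem.List.enumerate cs 0).foldl
    (fun d (p : Int × Char) => d.modify p.2 0 (· + ((1 : Int) <<< p.1.toNat)))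
    PySem.Dict.empty
  (PySem.List.pyRange 0 (PySem.List.len cs - 1) 1).map
    (fun s => full.getD (PySem.List.pyGetD cs s ' ') 0 >>> (s + 1).toNat)

-- ===== PRECONDITION & SPEC =====
def Spec_extract_map (subst : String) (out : List Int) : Prop := out = extract_map_alt subst
instance (subst : String) (out : List Int) : Decidable (Spec_extract_map subst out) := by unfold Spec_extract_map; infer_instance

-- ===== CLAIM (what is proved, stated in full; the proofs are below) =====
def Claim_equal_extract_map : Prop := ∀ (subst : String), Dom_extract_map subst → Spec_extract_map subst (extract_map subst)

-- ===== LEMMAS AND PROOFS =====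

-- maskFrom l c k = Σ over positions j of l: (if l[j] = c then 2^(k+j) else 0)
def maskFrom (l : List Char) (c : Char) (k : Nat) : Int :=
  match l with
  | [] => 0
  | x :: t => (if x = c then (2 : Int) ^ k else 0) + maskFrom t c (k + 1)

theorem maskFrom_nonneg (l : List Char) (c : Char) (k : Nat) : 0 ≤ maskFrom l c k := by
  induction l generalizing k with
  | nil => simp [maskFrom]
  | cons x t ih =>
    simp only [maskFrom]
    have := ih (k + 1)
    split <;> positivity

theorem maskFrom_shift (l : List Char) (c : Char) (k : Nat) :
    maskFrom l c k = 2 ^ k * maskFrom l c 0 := by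
  induction l generalizing k with
  | nil => simp [maskFrom]
  | cons x t ih =>
    simp only [maskFrom]
    rw [ih (k + 1), ih 1]
    split <;> ring

theorem maskFrom_lt (l : List Char) (c : Char) : maskFrom l c 0 < 2 ^ l.length := by
  induction l with
  | nil => simp [maskFrom]
  | cons x t ih =>
    simp only [maskFrom, List.length_cons]
    rw [maskFrom_shift t c 1]
    have h2 : (2 : Int) ^ (t.length + 1) = 2 ^ t.length + 2 ^ t.length := by ring
    split <;> simp only [pow_one] <;> omega

theorem maskFrom_append (l₁ l₂ : List Char) (c : Char) (k : Nat) :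
    maskFrom (l₁ ++ l₂) c k = maskFrom l₁ c k + maskFrom l₂ c (k + l₁.length) := by
  induction l₁ generalizing k with
  | nil => simp [maskFrom]
  | cons x t ih =>
    simp only [List.cons_append, maskFrom, List.length_cons, ih (k + 1)]
    ring_nf

-- A's inner loop over range(a, n) computes maskFrom of the suffix cs.drop a
theorem inner_loop_eq (cs : List Char) (c : Char) :
    ∀ (l : List Char) (a idx : Nat) (acc : Int), cs.drop a = l →
    ((PySem.List.pyRange (a : Int) (cs.length : Int) 1).foldl
      (fun (st : Int × Int) e =>
        (if (some c : Option Char) == PySem.List.pyGet? cs e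
           then st.1 + ((1 : Int) <<< st.2.toNat) else st.1,
         st.2 + 1)) (acc, (idx : Int))).1 = acc + maskFrom l c idx := by
  intro l
  induction l with
  | nil =>
    intro a idx acc h
    have ha : cs.length ≤ a := List.drop_eq_nil_iff.mp h
    have : PySem.List.pyRange (a : Int) (cs.length : Int) 1 = [] := by
      rw [PySem.List.pyRange_one]
      have : ((cs.length : Int) - (a : Int)).toNat = 0 := by omega
      simp [this]
    simp [this, maskFrom]
  | cons x t ih =>
    intro a idx acc h
    have ha : a < cs.length := by
      by_contra hc
      rw [List.drop_eq_nil_iff.mpr (by omega)] at h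
      exact List.cons_ne_nil x t h.symm
    have hx : cs[a]? = some x := by
      have h0 : (cs.drop a)[0]? = some x := by rw [h]; rfl
      rwa [List.getElem?_drop, Nat.add_zero] at h0
    have ht : cs.drop (a + 1) = t := by
      have := congrArg List.tail h
      simpa [← List.tail_drop] using this
    rw [PySem.List.pyRange_one_cons (by exact_mod_cast ha)]
    rw [List.foldl_cons]
    have hg : PySem.List.pyGet? cs (a : Int) = some x := by
      rw [PySem.List.pyGet?_natCast]; exact hx
    rw [hg]
    have hcast : ((a : Int) + 1) = ((a + 1 : Nat) : Int) := by push_cast; ring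
    have hcast2 : ((idx : Int) + 1) = ((idx + 1 : Nat) : Int) := by push_cast; ring
    by_cases hxc : x = c
    · have hb : ((some c : Option Char) == some x) = true := by simp [hxc]
      simp only [hb, if_true, hcast, hcast2]
      rw [ih (a + 1) (idx + 1) _ ht]
      have h2 : ((1 : Int) <<< idx) = 2 ^ idx := by
        rw [Int.shiftLeft_eq]; ring
      simp only [maskFrom, hxc, if_true, Int.toNat_natCast, h2]
      ring
    · have hb : ((some c : Option Char) == some x) = false := by
        simp [Ne.symm hxc]
      simp only [hb, Bool.false_eq_true, if_false, hcast, hcast2]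
      rw [ih (a + 1) (idx + 1) _ ht]
      simp only [maskFrom, hxc, if_false]
      ring

-- the full mask shifted right by s+1 is the mask of the suffix after s
theorem mask_shiftRight (cs : List Char) (c : Char) (t : Nat) (ht : t + 1 ≤ cs.length) :
    maskFrom cs c 0 >>> (t + 1) = maskFrom (cs.drop (t + 1)) c 0 := by
  have hsplit : cs = cs.take (t + 1) ++ cs.drop (t + 1) := (List.take_append_drop _ _).symm
  have hlen : (cs.take (t + 1)).length = t + 1 := by
    rw [List.length_take]; omega
  have hmask : maskFrom cs c 0 =
      maskFrom (cs.take (t + 1)) c 0 + 2 ^ (t + 1) * maskFrom (cs.drop (t + 1)) c 0 := by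
    conv_lhs => rw [hsplit]
    rw [maskFrom_append, hlen, Nat.zero_add,
      maskFrom_shift (cs.drop (t + 1)) c (t + 1)]
  rw [hmask, Int.shiftRight_eq_div_pow]
  push_cast
  rw [Int.add_mul_ediv_left _ _ (by positivity : (0 : Int) < 2 ^ (t + 1)).ne']
  have hlt := maskFrom_lt (cs.take (t + 1)) c
  rw [hlen] at hlt
  rw [Int.ediv_eq_zero_of_lt (maskFrom_nonneg _ _ _) hlt]
  omega

-- the dict built by B's loop holds maskFrom cs c k at key c
theorem dict_loop_eq (cs : List Char) :
    ∀ (k : Nat) (d : PySem.Dict Char Int) (c : Char),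
    ((PySem.List.enumerate cs (k : Int)).foldl
      (fun d (p : Int × Char) => d.modify p.2 0 (· + ((1 : Int) <<< p.1.toNat))) d).getD c 0
      = d.getD c 0 + maskFrom cs c k := by
  induction cs with
  | nil => intro k d c; simp [PySem.List.enumerate_nil, maskFrom]
  | cons x t ih =>
    intro k d c
    rw [PySem.List.enumerate_cons, List.foldl_cons]
    have hcast : ((k : Int) + 1) = ((k + 1 : Nat) : Int) := by push_cast; ring
    rw [hcast, ih (k + 1)]
    rw [PySem.Dict.getD_modify]
    simp only [maskFrom, Int.toNat_natCast]
    have h2 : ((1 : Int) <<< k) = 2 ^ k := by rw [Int.shiftLeft_eq]; ring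
    by_cases hcx : c = x
    · simp [hcx, h2]; ring
    · simp [hcx, Ne.symm hcx]

-- ===== VERDICT (by name: the statement is the Claim_ definition above) =====
theorem extract_map_spec : Claim_equal_extract_map := by
  intro subst _
  unfold Spec_extract_map extract_map extract_map_alt
  set cs := subst.toList with hcs
  simp only [PySem.List.len_eq]
  rw [PySem.List.foldl_append_singleton_eq_map]
  apply List.map_congr_left
  intro s hs
  rw [PySem.List.mem_pyRange_one] at hs
  obtain ⟨hs0, hs1⟩ := hs
  set t : Nat := s.toNat with htdef
  have hst : s = (t : Int) := by omega
  have htn : t + 1 ≤ cs.length := by omega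
  set c : Char := cs.getD t ' ' with hc
  -- B-side index
  have hB : PySem.List.pyGetD cs s ' ' = c := by
    rw [hst, PySem.List.pyGetD_natCast]
  -- the dict holds the full per-character mask
  have hdict : ((PySem.List.enumerate cs 0).foldl
      (fun d (p : Int × Char) => d.modify p.2 0 (· + ((1 : Int) <<< p.1.toNat)))
      PySem.Dict.empty).getD c 0 = maskFrom cs c 0 := by
    have := dict_loop_eq cs 0 PySem.Dict.empty c
    simpa [PySem.Dict.getD_empty] using this
  -- A-side fixed character
  have hgs : PySem.List.pyGet? cs s = some c := by
    rw [hst, PySem.List.pyGet?_natCast, hc,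
      List.getD_eq_getElem _ _ (by omega), List.getElem?_eq_getElem (by omega)]
  -- A's inner loop computes the suffix mask
  have hA : ((PySem.List.pyRange (s + 1) (cs.length : Int) 1).foldl
      (fun (st : Int × Int) e =>
        (if PySem.List.pyGet? cs s == PySem.List.pyGet? cs e
           then st.1 + ((1 : Int) <<< st.2.toNat) else st.1,
         st.2 + 1)) (0, 0)).1 = maskFrom (cs.drop (t + 1)) c 0 := by
    have hst1 : s + 1 = ((t + 1 : Nat) : Int) := by omega
    have h0 := inner_loop_eq cs c (cs.drop (t + 1)) (t + 1) 0 0 rfl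
    simp only [Nat.cast_zero, zero_add] at h0
    rw [hst1, hgs, h0]
  rw [hA, hB, hdict]
  have hshift : (s + 1).toNat = t + 1 := by omega
  rw [hshift, mask_shiftRight cs c t htn]
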